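-- pv_equiv track=rewrite | github.com/mbrosenuw/dmsklone | Code/Hamiltonians/torham.py | gettorblocks2
-- ===== SOURCE A (Python) =====
-- def gettorblocks2(basis):
--     blocks = {}
--     for idx, (n1, n2, l) in enumerate(basis):
--         if (l) not in blocks:
--             blocks[(l)] = {"start": idx, "end": idx, "count": 1}
--         else:
--             blocks[(l)]["end"] = idx
--             blocks[(l)]["count"] += 1
--     return blocks
-- ===== SOURCE B (Python) =====
-- def gettorblocks2(basis):
--     # Pass 1: group the positions of each l into an index map.
--     groups = {}
--     for idx, (n1, n2, l) in enumerate(basis):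
--         groups.setdefault(l, []).append(idx)
--     # Pass 2: summarise each group (indices are increasing, so first/last
--     # occurrence are the ends of the list).
--     return {l: {"start": ix[0], "end": ix[-1], "count": len(ix)}
--             for l, ix in groups.items()}
-- ===== Notes on version B (the rewrite author's own statement) =====
-- stated objective: alternative
-- what changed: B replaces A's single-pass in-place mutation of per-l summary dicts by a two-phase decomposition: one pass groups the indices of each l into lists, then a dict comprehension derives start/end/count from each group's first/last element and length.
import Mathlib
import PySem

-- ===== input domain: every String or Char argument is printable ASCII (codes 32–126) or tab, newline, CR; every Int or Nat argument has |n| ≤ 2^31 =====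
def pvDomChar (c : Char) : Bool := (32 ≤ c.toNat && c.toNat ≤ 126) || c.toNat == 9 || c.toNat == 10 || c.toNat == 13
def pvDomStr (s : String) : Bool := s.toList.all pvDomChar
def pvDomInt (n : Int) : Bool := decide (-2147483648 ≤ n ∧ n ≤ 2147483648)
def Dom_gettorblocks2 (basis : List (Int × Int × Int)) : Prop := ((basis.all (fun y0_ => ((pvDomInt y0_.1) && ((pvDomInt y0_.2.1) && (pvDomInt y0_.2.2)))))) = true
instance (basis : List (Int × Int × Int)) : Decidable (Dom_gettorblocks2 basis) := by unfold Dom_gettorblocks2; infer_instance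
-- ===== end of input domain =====

-- B restructures A's single pass that mutates per-l summary dicts in place into a
-- two-phase decomposition (group the indices of each l into lists, then summarise
-- each group); objective: alternative, same cost.

-- ===== PORT A =====
-- one loop step of A: insert a fresh {"start","end","count"} dict, or mutate the existing one
def torStepA (blocks : PySem.Dict Int (PySem.Dict String Int))
    (p : Int × (Int × Int × Int)) : PySem.Dict Int (PySem.Dict String Int) :=
  let l := p.2.2.2
  if blocks.contains l = false then
    blocks.insert l (PySem.Dict.ofList [("start", p.1), ("end", p.1), ("count", 1)])
  else
    -- blocks[l]["end"] = idx; blocks[l]["count"] += 1  (key l is present in this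
    -- branch, so 'modify' with default empty and 'getD' are exact)
    ((blocks.modify l PySem.Dict.empty (fun d => d.insert "end" p.1)).modify l PySem.Dict.empty
      (fun d => d.insert "count" (d.getD "count" 0 + 1)))

def gettorblocks2 (basis : List (Int × Int × Int)) : List (Int × List (String × Int)) :=
  (((PySem.List.enumerate basis 0).foldl torStepA PySem.Dict.empty).items.map
    (fun q => (q.1, q.2.items)))

-- ===== PORT B =====
-- pass 1: group indices per l (setdefault(l, []).append(idx));
-- pass 2: dict comprehension {l: {"start": ix[0], "end": ix[-1], "count": len(ix)}}
def gettorblocks2_alt (basis : List (Int × Int × Int)) : List (Int × List (String × Int)) :=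
  ((((PySem.List.enumerate basis 0).map (fun p => (p.2.2.2, p.1))).foldl
      (fun d q => d.modify q.1 [] (· ++ [q.2])) PySem.Dict.empty).items).map (fun g =>
    (g.1, [("start", (PySem.List.pyGet? g.2 0).getD 0),
           ("end", (PySem.List.pyGet? g.2 (-1)).getD 0),
           ("count", (g.2.length : Int))]))

-- ===== PRECONDITION & SPEC =====
def Spec_gettorblocks2 (basis : List (Int × Int × Int)) (out : List (Int × List (String × Int))) : Prop := out = gettorblocks2_alt basis
instance (basis : List (Int × Int × Int)) (out : List (Int × List (String × Int))) : Decidable (Spec_gettorblocks2 basis out) := by unfold Spec_gettorblocks2; infer_instance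

-- ===== CLAIM (what is proved, stated in full; the proofs are below) =====
def Claim_equal_gettorblocks2 : Prop := ∀ (basis : List (Int × Int × Int)), Dom_gettorblocks2 basis → Spec_gettorblocks2 basis (gettorblocks2 basis)

-- ===== LEMMAS AND PROOFS =====

-- the list of indices at which key l occurs in an enumerated prefix
def torIx (ps : List (Int × (Int × Int × Int))) (l : Int) : List Int :=
  (ps.filter (fun p => p.2.2.2 == l)).map (·.1)

theorem torA_keys (ps : List (Int × (Int × Int × Int))) :
    (ps.foldl torStepA PySem.Dict.empty).keys
      = PySem.Set.ofList (ps.map (fun p => p.2.2.2)) := by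
  induction ps using List.reverseRecOn with
  | nil => rfl
  | append_singleton ps p ih =>
    rw [List.foldl_append, List.map_append, PySem.Set.ofList_eq_foldl, List.foldl_append,
        ← PySem.Set.ofList_eq_foldl]
    simp only [List.map_cons, List.map_nil, List.foldl_cons, List.foldl_nil]
    set D := ps.foldl torStepA PySem.Dict.empty with hD
    rw [torStepA]
    by_cases h : D.contains p.2.2.2 = false
    · rw [if_pos h, PySem.Dict.keys_insert_of_not_contains _ _ h, ih]
      rw [PySem.Dict.contains_eq_decide_mem_keys, ih] at h
      simp only [decide_eq_false_iff_not, PySem.Set.mem_ofList] at h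
      simp [PySem.Set.add, PySem.Set.contains, h]
    · rw [if_neg h]
      simp only [Bool.not_eq_false] at h
      have hc : ∀ (e : PySem.Dict String Int) f, ((D.modify p.2.2.2 e f).contains p.2.2.2) = true := by
        intro e f; rw [PySem.Dict.contains_modify]; simp [h]
      rw [PySem.Dict.keys_modify, PySem.Dict.keys_insert_of_contains _ _ (hc _ _),
          PySem.Dict.keys_modify, PySem.Dict.keys_insert_of_contains _ _ h, ih]
      rw [PySem.Dict.contains_eq_decide_mem_keys, ih] at h
      simp only [decide_eq_true_eq, PySem.Set.mem_ofList] at h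
      simp [PySem.Set.add, PySem.Set.contains, h]

theorem torIx_nil_iff (ps : List (Int × (Int × Int × Int))) (l : Int) :
    torIx ps l = [] ↔ l ∉ ps.map (fun p => p.2.2.2) := by
  unfold torIx
  rw [List.map_eq_nil_iff, List.filter_eq_nil_iff]
  simp only [List.mem_map, not_exists, not_and, beq_iff_eq]

theorem torA_contains (ps : List (Int × (Int × Int × Int))) (l : Int) :
    (ps.foldl torStepA PySem.Dict.empty).contains l = decide (l ∈ ps.map (fun p => p.2.2.2)) := by
  rw [PySem.Dict.contains_eq_decide_mem_keys, torA_keys]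
  simp [PySem.Set.mem_ofList]

theorem torA_getD (ps : List (Int × (Int × Int × Int))) (l : Int) :
    (ps.foldl torStepA PySem.Dict.empty).getD l PySem.Dict.empty
      = match torIx ps l with
        | [] => PySem.Dict.empty
        | i :: is => PySem.Dict.mk [("start", i), ("end", (i :: is).getLast (by simp)),
                                    ("count", ((i :: is).length : Int))] := by
  induction ps using List.reverseRecOn with
  | nil => rfl
  | append_singleton ps p ih =>
    have hix : torIx (ps ++ [p]) l
        = torIx ps l ++ (if p.2.2.2 = l then [p.1] else []) := by
      by_cases hk : p.2.2.2 = l <;> simp [torIx, List.filter_append, hk]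
    rw [List.foldl_append]
    simp only [List.foldl_cons, List.foldl_nil]
    set D := ps.foldl torStepA PySem.Dict.empty with hD
    rw [torStepA, hix]
    by_cases hk : p.2.2.2 = l
    · subst hk
      by_cases h : D.contains p.2.2.2 = false
      · have hnil : torIx ps p.2.2.2 = [] := by
          rw [torIx_nil_iff]
          rw [hD, torA_contains] at h
          simpa using h
        rw [if_pos h, PySem.Dict.getD_insert_self, hnil, if_pos rfl]
        rfl
      · have hne : torIx ps p.2.2.2 ≠ [] := by
          rw [Ne, torIx_nil_iff]
          simp only [Bool.not_eq_false] at h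
          rw [hD, torA_contains] at h
          simpa using h
        obtain ⟨i, is, hi⟩ : ∃ i is, torIx ps p.2.2.2 = i :: is := by
          cases hcase : torIx ps p.2.2.2 with
          | nil => exact absurd hcase hne
          | cons a b => exact ⟨a, b, rfl⟩
        rw [if_neg h, PySem.Dict.getD_modify_self, PySem.Dict.getD_modify_self, ih, hi, if_pos rfl]
        simp only []
        simp [PySem.Dict.insert, PySem.Dict.contains, PySem.Dict.getD, PySem.Dict.get?,
          List.length_append]
    · rw [if_neg hk, List.append_nil]
      have hlk : l ≠ p.2.2.2 := fun hq => hk hq.symm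
      by_cases h : D.contains p.2.2.2 = false
      · rw [if_pos h, PySem.Dict.getD_insert_of_ne _ _ _ hlk, ih]
      · rw [if_neg h, PySem.Dict.getD_modify_of_ne _ _ _ hlk,
            PySem.Dict.getD_modify_of_ne _ _ _ hlk, ih]

theorem torPyGet_zero {α : Type} (i : α) (is : List α) :
    PySem.List.pyGet? (i :: is) 0 = some i := by
  simp [PySem.List.pyGet?, PySem.List.pyIdx?]

theorem torPyGet_neg_one {α : Type} (i : α) (is : List α) :
    PySem.List.pyGet? (i :: is) (-1) = some ((i :: is).getLast (by simp)) := by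
  rw [← List.getLast?_eq_some_getLast, List.getLast?_eq_getElem?]
  simp [PySem.List.pyGet?, PySem.List.pyIdx?]

theorem torB_keys (ps : List (Int × (Int × Int × Int))) :
    ((ps.map (fun p => (p.2.2.2, p.1))).foldl
        (fun d q => d.modify q.1 [] (· ++ [q.2])) PySem.Dict.empty).keys
      = PySem.Set.ofList (ps.map (fun p => p.2.2.2)) := by
  rw [PySem.Dict.keys_foldl_modify_key]
  simp [List.map_map, Function.comp_def, PySem.Set.update, PySem.Set.ofList_eq_foldl,
    PySem.Dict.keys]
  rfl

theorem torB_getD (ps : List (Int × (Int × Int × Int))) (l : Int) :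
    ((ps.map (fun p => (p.2.2.2, p.1))).foldl
        (fun d q => d.modify q.1 [] (· ++ [q.2])) PySem.Dict.empty).getD l []
      = torIx ps l := by
  rw [PySem.Dict.getD_foldl_modify_append]
  simp [torIx, List.filter_map, List.map_map, Function.comp_def, PySem.Dict.getD_empty]

theorem tor_main (basis : List (Int × Int × Int)) :
    gettorblocks2 basis = gettorblocks2_alt basis := by
  unfold gettorblocks2 gettorblocks2_alt
  set ps := PySem.List.enumerate basis 0 with hps
  have hAnd : (ps.foldl torStepA PySem.Dict.empty).keys.Nodup := by
    rw [torA_keys]; exact PySem.Set.nodup_ofList _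
  have hBnd : ((ps.map (fun p => (p.2.2.2, p.1))).foldl
      (fun d q => d.modify q.1 [] (· ++ [q.2])) PySem.Dict.empty).keys.Nodup := by
    rw [torB_keys]; exact PySem.Set.nodup_ofList _
  rw [PySem.Dict.items_eq_map_keys _ hAnd PySem.Dict.empty,
      PySem.Dict.items_eq_map_keys _ hBnd [], torA_keys, torB_keys,
      List.map_map, List.map_map]
  apply List.map_congr_left
  intro l hl
  have hlm : l ∈ ps.map (fun p => p.2.2.2) := (PySem.Set.mem_ofList _ _).mp hl
  have hne : torIx ps l ≠ [] := fun hc => ((torIx_nil_iff ps l).mp hc) hlm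
  obtain ⟨i, is, hi⟩ : ∃ i is, torIx ps l = i :: is := by
    cases hcase : torIx ps l with
    | nil => exact absurd hcase hne
    | cons a b => exact ⟨a, b, rfl⟩
  simp only [Function.comp_apply, torA_getD, torB_getD, hi, torPyGet_zero, torPyGet_neg_one]
  rfl

-- ===== VERDICT (by name: the statement is the Claim_ definition above) =====
theorem gettorblocks2_spec : Claim_equal_gettorblocks2 := by
  intro basis _
  unfold Spec_gettorblocks2
  exact tor_main basis
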